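-- pv_equiv track=rewrite | github.com/Ashiq-am/Path-of-Python | 39.Python Programming Examples/5.String Programs/Python – Capitalize repeated characters in a string/Capitalize repeated characters in a string.py | RepeatedUpper
-- ===== SOURCE A (Python) =====
-- def RepeatedUpper(s):
--
-- 	# declaring dictionary
-- 	dic = {}
--
-- 	# Traversing the string
-- 	for i in s:
--
-- 		# If the character is already
-- 		# present in dictionary then increment
-- 		# the frequency of the character
-- 		if i in dic:
-- 			dic[i] = dic[i]+1
--
-- # If the character is not present in
-- # the dictionary then inserting
-- # the character in the dictionary
-- 		else:
-- 			dic[i] = 1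
-- 	ans = ''
--
-- 	# traversing the string
-- 	for i in s:
--
-- 		# if the frequency of the character is
-- 		# greater than one
-- 		if dic[i] > 1:
--
-- 			# change into uppercase
-- 			i = i.upper()
--
-- 		# appending each character to the ans
-- 		ans = ans+i
-- 	return ans
-- ===== SOURCE B (Python) =====
-- def RepeatedUpper(s):
--     # Sort-then-scan: sort the characters, read off the duplicated ones from
--     # adjacent equal pairs, then translate the original string.
--     t = sorted(s)
--     dups = {a for a, b in zip(t, t[1:]) if a == b}
--     return ''.join(c.upper() if c in dups else c for c in s)
-- ===== Notes on version B (the rewrite author's own statement) =====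
-- stated objective: alternative
-- what changed: A's frequency dictionary and counting loop are replaced by sort-then-scan: sort the characters, collect the duplicated ones from adjacent equal pairs of the sorted list, then map each original character through that set; no counts are ever maintained.
import Mathlib
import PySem

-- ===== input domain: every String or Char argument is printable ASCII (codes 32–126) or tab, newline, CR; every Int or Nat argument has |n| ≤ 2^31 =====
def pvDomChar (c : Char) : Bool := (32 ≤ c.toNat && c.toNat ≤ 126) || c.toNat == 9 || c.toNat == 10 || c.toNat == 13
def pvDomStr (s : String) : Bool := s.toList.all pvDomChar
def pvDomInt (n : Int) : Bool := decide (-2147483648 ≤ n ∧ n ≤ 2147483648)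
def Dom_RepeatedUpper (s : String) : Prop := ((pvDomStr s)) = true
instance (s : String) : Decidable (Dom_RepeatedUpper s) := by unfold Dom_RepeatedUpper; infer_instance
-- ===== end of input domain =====

-- B replaces A's frequency dictionary with sort-then-scan (duplicated chars read off adjacent equal pairs of the sorted list); alternative algorithm, same return value.


-- ===== PORT A =====
-- first loop: build the frequency dict (dic[i] is always present in the second loop, so dic[i] = dic.getD i 0 there)
def RepeatedUpper (s : String) : String :=
  let dic : PySem.Dict Char Int :=
    s.toList.foldl
      (fun d i => if d.contains i then d.insert i (d.getD i 0 + 1) else d.insert i 1)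
      PySem.Dict.empty
  let ans : List Char :=
    s.toList.foldl
      (fun ans i => ans ++ [if dic.getD i 0 > 1 then PySem.Chars.upperChar i else i])
      []
  String.ofList ans

-- ===== PORT B =====
-- duplicated characters of t: {a for a, b in zip(t, t[1:]) if a == b} (t[1:] is PySem.List.slice)
def pvDups (t : List Char) : List Char :=
  ((t.zip (PySem.List.slice t (some 1) none)).filter (fun p => p.1 == p.2)).map (·.1)

def RepeatedUpper_alt (s : String) : String :=
  let t := PySem.List.sorted s.toList (fun c => c) false
  let dups : PySem.Set Char := PySem.Set.ofList (pvDups t)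
  String.ofList (s.toList.map (fun c =>
    if PySem.Set.contains dups c then PySem.Chars.upperChar c else c))

-- ===== PRECONDITION & SPEC =====
def Spec_RepeatedUpper (s : String) (out : String) : Prop := out = RepeatedUpper_alt s
instance (s : String) (out : String) : Decidable (Spec_RepeatedUpper s out) := by unfold Spec_RepeatedUpper; infer_instance

-- ===== CLAIM (what is proved, stated in full; the proofs are below) =====
def Claim_equal_RepeatedUpper : Prop := ∀ (s : String), Dom_RepeatedUpper s → Spec_RepeatedUpper s (RepeatedUpper s)

-- ===== LEMMAS AND PROOFS =====

-- A's branchy counting step is extensionally the unconditional insert-increment step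
theorem pv_branch_eq :
    (fun (d : PySem.Dict Char Int) (i : Char) =>
        if d.contains i then d.insert i (d.getD i 0 + 1) else d.insert i 1) =
    (fun (d : PySem.Dict Char Int) (i : Char) => d.insert i (d.getD i 0 + 1)) := by
  funext d i
  by_cases h : d.contains i
  · simp [h]
  · rw [if_neg (by simp [h]), PySem.Dict.getD_of_not_contains d 0 (by simpa using h)]
    norm_num

-- the dict A builds maps every character to its count in s
theorem pv_dic_getD (l : List Char) (c : Char) :
    (l.foldl
      (fun d i => if d.contains i then d.insert i (d.getD i 0 + 1) else d.insert i 1)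
      PySem.Dict.empty).getD c 0 = (l.count c : Int) := by
  rw [pv_branch_eq, PySem.Dict.getD_foldl_insert_add_one, PySem.Dict.getD_empty]
  simp

-- structural step of pvDups
theorem pvDups_cons_cons (x y : Char) (ys : List Char) :
    pvDups (x :: y :: ys) = (if x = y then [x] else []) ++ pvDups (y :: ys) := by
  simp only [pvDups, PySem.List.slice_from_one, List.tail_cons, List.zip_cons_cons,
    List.filter_cons]
  by_cases h : x = y <;> simp [h]

-- a character in pvDups t occurs at least twice in t
theorem count_of_mem_pvDups (t : List Char) (c : Char) (h : c ∈ pvDups t) :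
    2 ≤ t.count c := by
  induction t with
  | nil => simp [pvDups, PySem.List.slice] at h
  | cons x xs ih =>
    cases xs with
    | nil => simp [pvDups, PySem.List.slice_from_one] at h
    | cons y ys =>
      rw [pvDups_cons_cons] at h
      rcases List.mem_append.mp h with h1 | h2
      · have hxy : x = y := by by_contra hne; simp [hne] at h1
        have hcx : c = x := by simpa [hxy] using h1
        subst hcx; subst hxy
        simp
      · have := ih h2
        calc 2 ≤ (y :: ys).count c := this
          _ ≤ (x :: y :: ys).count c := by simp [List.count_cons]

-- in a sorted list, a character occurring at least twice appears in an adjacent equal pair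
theorem mem_pvDups_of_count (t : List Char) (hs : t.Pairwise (· ≤ ·)) (c : Char)
    (h : 2 ≤ t.count c) : c ∈ pvDups t := by
  induction t with
  | nil => simp at h
  | cons x xs ih =>
    cases xs with
    | nil =>
      rw [List.count_cons, List.count_nil] at h
      split at h <;> omega
    | cons y ys =>
      rw [pvDups_cons_cons]
      by_cases hxc : x = c
      · subst hxc
        -- head = c and count >= 2 force the second element to be c too
        have hmem : x ∈ y :: ys := by
          rw [List.count_cons_self] at h
          exact List.count_pos_iff.mp (by omega)
        have hyc : y = x := by
          rcases List.mem_cons.mp hmem with h' | h'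
          · exact h'.symm
          · have h1 : x ≤ y := (List.pairwise_cons.mp hs).1 y (by simp)
            have h2 : y ≤ x := ((List.pairwise_cons.mp (List.pairwise_cons.mp hs).2).1) x h'
            exact le_antisymm h2 h1
        subst hyc
        simp
      · have hcount : 2 ≤ (y :: ys).count c := by
          rw [List.count_cons] at h
          simpa [hxc] using h
        have := ih (List.pairwise_cons.mp hs).2 hcount
        exact List.mem_append.mpr (Or.inr this)

-- membership in B's dups set is exactly "count > 1 in s"
theorem pv_dups_iff (l : List Char) (c : Char) :
    (PySem.Set.contains (PySem.Set.ofList (pvDups (PySem.List.sorted l (fun c => c) false))) c = true)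
      ↔ 1 < l.count c := by
  rw [PySem.Set.contains_iff, PySem.Set.mem_ofList]
  constructor
  · intro h
    have h2 := count_of_mem_pvDups _ _ h
    have hperm : (PySem.List.sorted l (fun c => c) false).Perm l := PySem.List.sorted_perm l _ _
    rw [hperm.count_eq] at h2
    omega
  · intro h
    have hperm : (PySem.List.sorted l (fun c => c) false).Perm l := PySem.List.sorted_perm l _ _
    apply mem_pvDups_of_count
    · simpa using PySem.List.sorted_pairwise l (fun c => c)
    · rw [hperm.count_eq]; omega

-- ===== VERDICT (by name: the statement is the Claim_ definition above) =====
theorem RepeatedUpper_spec : Claim_equal_RepeatedUpper := by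
  intro s _
  show RepeatedUpper s = RepeatedUpper_alt s
  simp only [RepeatedUpper, RepeatedUpper_alt,
    PySem.List.foldl_append_singleton_eq_map, List.nil_append]
  congr 1
  apply List.map_congr_left
  intro c _
  rw [pv_dic_getD]
  by_cases h : 1 < s.toList.count c
  · rw [if_pos ((pv_dups_iff _ _).mpr h), if_pos (by exact_mod_cast h)]
  · rw [if_neg (fun hc => h ((pv_dups_iff _ _).mp hc)), if_neg (by exact_mod_cast h)]
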